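-- pv_equiv track=rewrite | github.com/shuyan01/capstone | retrieval/advanced_filters.py | group_resume_texts
-- ===== SOURCE A (Python) =====
-- def group_resume_texts(chunks: list[dict] | None) -> dict[str, str]:
--     """Builds one lowercased text blob per resume_id."""
--     if not chunks:
--         return {}
--
--     grouped: dict[str, list[str]] = {}
--     for chunk in chunks:
--         resume_id = chunk.get("resume_id")
--         text = chunk.get("text", "")
--         if not resume_id:
--             continue
--         grouped.setdefault(resume_id, []).append(text)
--
--     return {
--         resume_id: " ".join(texts).lower()
--         for resume_id, texts in grouped.items()
--     }
-- ===== SOURCE B (Python) =====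
-- def group_resume_texts(chunks: list[dict] | None) -> dict[str, str]:
--     """Builds one lowercased text blob per resume_id, in a single pass."""
--     if not chunks:
--         return {}
--     result: dict[str, str] = {}
--     for chunk in chunks:
--         resume_id = chunk.get("resume_id")
--         if not resume_id:
--             continue
--         text = chunk.get("text", "").lower()
--         if resume_id in result:
--             result[resume_id] = result[resume_id] + " " + text
--         else:
--             result[resume_id] = text
--     return result
-- ===== Notes on version B (the rewrite author's own statement) =====
-- stated objective: simpler
-- what changed: B builds the final dict[str,str] directly in one pass, lowercasing each chunk's text immediately and concatenating it onto a running string per id, instead of A's grouping into per-id lists followed by a second join-and-lower comprehension pass.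
import Mathlib
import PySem

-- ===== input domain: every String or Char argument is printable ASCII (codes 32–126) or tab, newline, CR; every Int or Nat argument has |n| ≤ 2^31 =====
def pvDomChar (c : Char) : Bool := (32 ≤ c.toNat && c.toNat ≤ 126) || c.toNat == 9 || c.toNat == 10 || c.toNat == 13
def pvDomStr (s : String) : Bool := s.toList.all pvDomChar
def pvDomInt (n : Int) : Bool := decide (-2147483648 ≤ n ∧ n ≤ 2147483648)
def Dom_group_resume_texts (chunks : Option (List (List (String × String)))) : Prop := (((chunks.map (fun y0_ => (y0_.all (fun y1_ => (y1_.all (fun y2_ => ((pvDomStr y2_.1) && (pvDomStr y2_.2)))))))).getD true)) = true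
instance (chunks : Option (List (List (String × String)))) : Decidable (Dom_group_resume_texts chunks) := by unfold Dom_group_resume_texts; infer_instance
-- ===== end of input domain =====

-- B builds the result dict of lowercased blobs in a single pass (string accumulator per id),
-- eliminating A's per-id list accumulators and its second join-and-lower pass (objective: simpler).

-- ===== PORT A =====
def group_resume_texts (chunks : Option (List (List (String × String)))) : List (String × String) :=
  match chunks with
  | none => []
  | some cs =>
    if cs = [] then []
    else
      let grouped : PySem.Dict String (List String) :=
        cs.foldl (fun g chunk =>
          let resume_id := (PySem.Dict.mk chunk).get? "resume_id"
          let text := ((PySem.Dict.mk chunk).get? "text").getD ""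
          match resume_id with
          | none => g
          | some rid => if rid = "" then g else g.modify rid [] (· ++ [text]))
          PySem.Dict.empty
      grouped.items.map (fun p => (p.1, PySem.Str.lower (PySem.Str.join " " p.2)))

-- ===== PORT B =====
def group_resume_texts_alt (chunks : Option (List (List (String × String)))) : List (String × String) :=
  match chunks with
  | none => []
  | some cs =>
    if cs = [] then []
    else
      (cs.foldl (fun result chunk =>
        match (PySem.Dict.mk chunk).get? "resume_id" with
        | none => result
        | some rid =>
          if rid = "" then result
          else
            let text := PySem.Str.lower (((PySem.Dict.mk chunk).get? "text").getD "")
            match result.get? rid with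
            | some acc => result.insert rid (acc ++ " " ++ text)
            | none => result.insert rid text)
        PySem.Dict.empty).items

-- ===== PRECONDITION & SPEC =====
def Spec_group_resume_texts (chunks : Option (List (List (String × String)))) (out : List (String × String)) : Prop := out = group_resume_texts_alt chunks
instance (chunks : Option (List (List (String × String)))) (out : List (String × String)) : Decidable (Spec_group_resume_texts chunks out) := by unfold Spec_group_resume_texts; infer_instance

-- ===== CLAIM (what is proved, stated in full; the proofs are below) =====
def Claim_equal_group_resume_texts : Prop := ∀ (chunks : Option (List (List (String × String)))), Dom_group_resume_texts chunks → Spec_group_resume_texts chunks (group_resume_texts chunks)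

-- ===== LEMMAS AND PROOFS =====

/-- A's per-chunk step: group texts into lists per id. -/
def pvStepA (g : PySem.Dict String (List String)) (chunk : List (String × String)) :
    PySem.Dict String (List String) :=
  let resume_id := (PySem.Dict.mk chunk).get? "resume_id"
  let text := ((PySem.Dict.mk chunk).get? "text").getD ""
  match resume_id with
  | none => g
  | some rid => if rid = "" then g else g.modify rid [] (· ++ [text])

/-- B's per-chunk step: extend the lowercased blob per id. -/
def pvStepB (result : PySem.Dict String String) (chunk : List (String × String)) :
    PySem.Dict String String :=
  match (PySem.Dict.mk chunk).get? "resume_id" with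
  | none => result
  | some rid =>
    if rid = "" then result
    else
      let text := PySem.Str.lower (((PySem.Dict.mk chunk).get? "text").getD "")
      match result.get? rid with
      | some acc => result.insert rid (acc ++ " " ++ text)
      | none => result.insert rid text

/-- A's post-pass on one value: join with spaces, then lowercase. -/
def pvF (ts : List String) : String := PySem.Str.lower (PySem.Str.join " " ts)

def pvMapF (p : String × List String) : String × String := (p.1, pvF p.2)

/-- A's grouped dict pushed through the post-pass, as a dict. -/
def pvMapD (g : PySem.Dict String (List String)) : PySem.Dict String String :=
  PySem.Dict.mk (g.items.map pvMapF)

theorem pvF_single (t : String) : pvF [t] = PySem.Str.lower t := by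
  apply String.toList_inj.mp
  simp [pvF, PySem.Str.toList_lower, PySem.Str.toList_join, PySem.Chars.join, List.intercalate]

theorem pvChars_join_append (sep x : List Char) (ls : List (List Char)) (h : ls ≠ []) :
    PySem.Chars.join sep (ls ++ [x]) = PySem.Chars.join sep ls ++ sep ++ x := by
  induction ls with
  | nil => simp at h
  | cons a l ih =>
    cases l with
    | nil => simp [PySem.Chars.join, List.intercalate]
    | cons b l' =>
      have h2 : (b :: l') ≠ ([] : List (List Char)) := by simp
      have := ih h2
      simp only [List.cons_append, PySem.Chars.join_cons_cons] at *
      rw [this]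
      simp [List.append_assoc]

theorem pvF_append (ts : List String) (t : String) (h : ts ≠ []) :
    pvF (ts ++ [t]) = pvF ts ++ " " ++ PySem.Str.lower t := by
  apply String.toList_inj.mp
  have hmap : (ts.map String.toList) ≠ [] := by simpa using h
  simp only [pvF, String.toList_append, PySem.Str.toList_lower, PySem.Str.toList_join,
    List.map_append, List.map_cons, List.map_nil]
  rw [pvChars_join_append _ _ _ hmap]
  simp [PySem.Chars.lower, PySem.Chars.lowerChar, PySem.Chars.isupper]

theorem pvGet?_mk_map (l : List (String × List String)) (k : String) :
    (PySem.Dict.mk (l.map pvMapF)).get? k = ((PySem.Dict.mk l).get? k).map pvF := by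
  induction l with
  | nil => rfl
  | cons p l ih =>
    obtain ⟨a, b⟩ := p
    simp only [List.map_cons, pvMapF, PySem.Dict.get?_mk_cons]
    by_cases h : (a == k) = true
    · simp [h]
    · simp only [h, if_false, Bool.false_eq_true]
      exact ih

theorem pvGet?_mapD (g : PySem.Dict String (List String)) (k : String) :
    (pvMapD g).get? k = (g.get? k).map pvF := by
  obtain ⟨l⟩ := g
  exact pvGet?_mk_map l k

theorem pvContains_mapD (g : PySem.Dict String (List String)) (k : String) :
    (pvMapD g).contains k = g.contains k := by
  by_cases h : g.contains k = true
  · have hg : g.get? k ≠ none := by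
      intro hn; rw [PySem.Dict.get?_eq_none_iff_contains] at hn; simp [h] at hn
    have : (pvMapD g).get? k ≠ none := by
      rw [pvGet?_mapD]; cases hh : g.get? k with
      | none => exact absurd hh hg
      | some v => simp
    rw [h]
    by_contra hc
    have : (pvMapD g).get? k = none := by
      rw [PySem.Dict.get?_eq_none_iff_contains]
      cases hcc : (pvMapD g).contains k with
      | false => rfl
      | true => exact absurd hcc hc
    exact absurd this ‹(pvMapD g).get? k ≠ none›
  · have hf : g.contains k = false := by cases hc : g.contains k with
      | false => rfl
      | true => exact absurd hc h
    have hg : g.get? k = none := (PySem.Dict.get?_eq_none_iff_contains g k).mpr hf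
    have : (pvMapD g).get? k = none := by rw [pvGet?_mapD, hg]; rfl
    rw [hf, (PySem.Dict.get?_eq_none_iff_contains _ k).mp this]

/-- One step of B on the mapped dict equals the mapped result of one step of A,
    provided every accumulated list is nonempty. -/
theorem pvStep_commute (g : PySem.Dict String (List String)) (c : List (String × String))
    (hne : ∀ p ∈ g.items, p.2 ≠ []) :
    pvStepB (pvMapD g) c = pvMapD (pvStepA g c) := by
  unfold pvStepA pvStepB
  cases hr : (PySem.Dict.mk c).get? "resume_id" with
  | none => rfl
  | some rid =>
    simp only []
    by_cases hrid : rid = ""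
    · simp [hrid]
    · simp only [if_neg hrid]
      set t := ((PySem.Dict.mk c).get? "text").getD "" with ht
      cases hg : g.get? rid with
      | none =>
        have hcon : g.contains rid = false := (PySem.Dict.get?_eq_none_iff_contains g rid).mp hg
        have hconB : (pvMapD g).contains rid = false := by rw [pvContains_mapD]; exact hcon
        have hgB : (pvMapD g).get? rid = none := by rw [pvGet?_mapD, hg]; rfl
        rw [hgB]
        apply PySem.Dict.ext
        rw [PySem.Dict.items_insert_of_not_contains _ _ hconB]
        have : g.modify rid [] (· ++ [t]) = g.insert rid ([] ++ [t]) := by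
          unfold PySem.Dict.modify
          rw [PySem.Dict.getD_of_not_contains g _ hcon]
        rw [this]
        simp only [pvMapD, List.nil_append]
        rw [PySem.Dict.items_insert_of_not_contains _ _ hcon]
        simp [pvMapF, pvF_single]
      | some ts =>
        have hmem : (rid, ts) ∈ g.items := PySem.Dict.mem_items_of_get?_eq_some g hg
        have hts : ts ≠ [] := hne _ hmem
        have hcon : g.contains rid = true := by
          by_contra hc
          have hf : g.contains rid = false := by cases hcc : g.contains rid with
            | false => rfl
            | true => exact absurd hcc hc
          rw [(PySem.Dict.get?_eq_none_iff_contains g rid).mpr hf] at hg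
          simp at hg
        have hconB : (pvMapD g).contains rid = true := by rw [pvContains_mapD]; exact hcon
        have hgB : (pvMapD g).get? rid = some (pvF ts) := by rw [pvGet?_mapD, hg]; rfl
        rw [hgB]
        apply PySem.Dict.ext
        rw [PySem.Dict.items_insert_of_contains _ _ hconB]
        have : g.modify rid [] (· ++ [t]) = g.insert rid (ts ++ [t]) := by
          unfold PySem.Dict.modify
          rw [PySem.Dict.getD_of_get?_eq_some g _ hg]
        rw [this]
        simp only [pvMapD]
        rw [PySem.Dict.items_insert_of_contains _ _ hcon]
        rw [List.map_map, List.map_map]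
        apply List.map_congr_left
        intro p hp
        simp only [Function.comp_apply, pvMapF]
        by_cases hk : p.1 = rid
        · simp [hk, pvF_append ts t hts]
        · simp [hk]

theorem pvStepA_preserves (g : PySem.Dict String (List String)) (c : List (String × String))
    (hne : ∀ p ∈ g.items, p.2 ≠ []) :
    ∀ p ∈ (pvStepA g c).items, p.2 ≠ [] := by
  unfold pvStepA
  cases hr : (PySem.Dict.mk c).get? "resume_id" with
  | none => exact hne
  | some rid =>
    simp only []
    by_cases hrid : rid = ""
    · simpa [hrid] using fun a b h => hne (a, b) h
    · simp only [if_neg hrid]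
      set t := ((PySem.Dict.mk c).get? "text").getD "" with ht
      unfold PySem.Dict.modify
      intro p hp
      by_cases hcon : g.contains rid = true
      · rw [PySem.Dict.items_insert_of_contains _ _ hcon] at hp
        obtain ⟨q, hq, hpq⟩ := List.mem_map.mp hp
        by_cases hk : q.1 = rid
        · simp [hk] at hpq; subst hpq; simp
        · simp [hk] at hpq; subst hpq; exact hne _ hq
      · have hf : g.contains rid = false := by cases hcc : g.contains rid with
          | false => rfl
          | true => exact absurd hcc hcon
        rw [PySem.Dict.items_insert_of_not_contains _ _ hf] at hp
        rcases List.mem_append.mp hp with h | h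
        · exact hne _ h
        · simp at h; subst h
          rw [PySem.Dict.getD_of_not_contains g _ hf]
          simp

theorem pvFoldl_commute (cs : List (List (String × String)))
    (g : PySem.Dict String (List String)) (hne : ∀ p ∈ g.items, p.2 ≠ []) :
    cs.foldl pvStepB (pvMapD g) = pvMapD (cs.foldl pvStepA g) := by
  induction cs generalizing g with
  | nil => rfl
  | cons c cs ih =>
    simp only [List.foldl_cons]
    rw [pvStep_commute g c hne]
    exact ih _ (pvStepA_preserves g c hne)

-- ===== VERDICT (by name: the statement is the Claim_ definition above) =====
theorem group_resume_texts_spec : Claim_equal_group_resume_texts := by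
  unfold Claim_equal_group_resume_texts
  intro chunks _
  unfold Spec_group_resume_texts
  cases chunks with
  | none => rfl
  | some cs =>
    show group_resume_texts (some cs) = group_resume_texts_alt (some cs)
    unfold group_resume_texts group_resume_texts_alt
    by_cases h : cs = []
    · simp [h]
    · simp only [if_neg h]
      have hB : cs.foldl pvStepB PySem.Dict.empty =
          pvMapD (cs.foldl pvStepA PySem.Dict.empty) := by
        have hempty : pvMapD PySem.Dict.empty = PySem.Dict.empty := rfl
        rw [← hempty, pvFoldl_commute cs PySem.Dict.empty (by intro p hp; simp [PySem.Dict.empty] at hp)]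
      change (cs.foldl pvStepA PySem.Dict.empty).items.map pvMapF =
        (cs.foldl pvStepB PySem.Dict.empty).items
      rw [hB]
      rfl
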